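-- pv_equiv track=rewrite | github.com/Askinkaty/GramCorr | evaluation/eval.py | update_lines
-- ===== SOURCE A (Python) =====
-- def update_lines(line):
--     new_s_line = []
--     s = ''
--     for i, sl in enumerate(line):
--         if not ('$ $ $' in sl or '$$$' in sl):
--             s += sl
--             if i + 1 == len(line):
--                 new_s_line.append(s)
--                 s = ''
--         else:
--             if s:
--                 new_s_line.append(s)
--             new_s_line.append(sl)
--             s = ''
--     return new_s_line
-- ===== SOURCE B (Python) =====
-- def update_lines(line):
--     def is_delim(sl):
--         return '$ $ $' in sl or '$$$' in sl
--
--     out = []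
--     i = 0
--     n = len(line)
--     while i < n:
--         if is_delim(line[i]):
--             out.append(line[i])
--             i += 1
--         else:
--             # maximal run of non-delimiter lines starting at i
--             k = i + 1
--             while k < n and not is_delim(line[k]):
--                 k += 1
--             j = ''.join(line[i:k])
--             if k == n or j:
--                 out.append(j)
--             i = k
--     return out
-- ===== Notes on version B (the rewrite author's own statement) =====
-- stated objective: alternative
-- what changed: Replaces A's single running string accumulator with manual flush logic by a run-based scan: find each maximal run of non-delimiter lines, ''.join it in one step (emitted when non-empty or at end of input), and emit delimiter lines individually.
import Mathlib
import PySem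

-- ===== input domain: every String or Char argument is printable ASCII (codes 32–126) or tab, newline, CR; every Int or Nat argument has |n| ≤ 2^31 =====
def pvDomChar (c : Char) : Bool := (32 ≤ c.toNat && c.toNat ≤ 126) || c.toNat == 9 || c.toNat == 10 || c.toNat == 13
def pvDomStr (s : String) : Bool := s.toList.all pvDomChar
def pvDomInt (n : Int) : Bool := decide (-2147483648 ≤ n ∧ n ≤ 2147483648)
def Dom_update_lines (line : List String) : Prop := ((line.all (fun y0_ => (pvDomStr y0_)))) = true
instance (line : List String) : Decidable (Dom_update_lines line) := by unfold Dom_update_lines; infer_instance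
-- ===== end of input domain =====

-- B replaces A's running string accumulator + manual flush logic by a run-based scan
-- (each maximal non-delimiter run is joined in one step); objective: alternative decomposition.

-- '$ $ $' in sl or '$$$' in sl  (the delimiter test both versions use)
def pvIsDelim (sl : String) : Bool := PySem.Str.isIn "$ $ $" sl || PySem.Str.isIn "$$$" sl

-- ===== PORT A =====
-- A's for-loop over enumerate(line): state = (new_s_line = acc, s), index i checked against len(line)
def pvALoop (line : List String) : List String → Nat → List String → String → List String
  | [], _, acc, _ => acc
  | sl :: tl, i, acc, s =>
    if !(pvIsDelim sl) then
      let s' := s ++ sl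
      if i + 1 = line.length then pvALoop line tl (i + 1) (acc ++ [s']) ""
      else pvALoop line tl (i + 1) acc s'
    else
      pvALoop line tl (i + 1) ((if s ≠ "" then acc ++ [s] else acc) ++ [sl]) ""

def update_lines (line : List String) : List String := pvALoop line line 0 [] ""

-- ===== PORT B =====
-- Source B's inner while loop: length of the maximal non-delimiter prefix
def pvRunLen : List String → Nat
  | [] => 0
  | x :: t => if pvIsDelim x then 0 else pvRunLen t + 1

-- Source B's outer while loop over the remaining suffix line[i:]; the slice line[i:k] and the
-- tail line[k:] have 0 ≤ i ≤ k ≤ len(line), where Python slicing is exactly take/drop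
def pvBGo : List String → List String
  | [] => []
  | x :: tl =>
    if pvIsDelim x then x :: pvBGo tl
    else
      let k := pvRunLen tl + 1
      let j := PySem.Str.join "" ((x :: tl).take k)
      let tail := (x :: tl).drop k
      (if tail.isEmpty || j ≠ "" then [j] else []) ++ pvBGo tail
termination_by l => l.length
decreasing_by
  · simp
  · simp [List.length_drop]

def update_lines_alt (line : List String) : List String := pvBGo line

-- ===== PRECONDITION & SPEC =====
def Spec_update_lines (line : List String) (out : List String) : Prop := out = update_lines_alt line
instance (line : List String) (out : List String) : Decidable (Spec_update_lines line out) := by unfold Spec_update_lines; infer_instance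

-- ===== CLAIM (what is proved, stated in full; the proofs are below) =====
def Claim_equal_update_lines : Prop := ∀ (line : List String), Dom_update_lines line → Spec_update_lines line (update_lines line)

-- ===== LEMMAS AND PROOFS =====

-- A's loop, rewritten without the index: the i+1 == len(line) test is 'tl = []' on the suffix
def pvARec : List String → String → List String
  | [], _ => []
  | sl :: tl, s =>
    if !(pvIsDelim sl) then
      if tl = [] then [s ++ sl] else pvARec tl (s ++ sl)
    else
      ((if s ≠ "" then [s] else []) ++ [sl]) ++ pvARec tl ""

lemma pvALoop_eq (line : List String) : ∀ (rest : List String) (i : Nat) (acc : List String) (s : String),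
    i + rest.length = line.length → pvALoop line rest i acc s = acc ++ pvARec rest s := by
  intro rest
  induction rest with
  | nil => intro i acc s _; simp [pvALoop, pvARec]
  | cons sl tl ih =>
    intro i acc s h
    simp only [List.length_cons] at h
    by_cases hd : pvIsDelim sl
    · rw [pvALoop, pvARec]
      simp only [hd, Bool.not_true, Bool.false_eq_true, if_false]
      rw [ih (i + 1) _ "" (by omega)]
      split_ifs <;> simp
    · rw [pvALoop, pvARec]
      simp only [hd, Bool.not_false, if_true]
      by_cases ht : tl = []
      · subst ht
        have hi : i + 1 = line.length := by simpa using h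
        simp [hi, pvALoop]
      · have hlen : tl.length ≠ 0 := by simpa using ht
        have hi : ¬ (i + 1 = line.length) := by omega
        rw [if_neg hi, if_neg ht, ih (i + 1) acc (s ++ sl) (by omega)]

lemma pvJoin_nil : PySem.Str.join "" [] = "" := rfl

lemma pvJoin_cons (x : String) (xs : List String) :
    PySem.Str.join "" (x :: xs) = x ++ PySem.Str.join "" xs := by
  cases xs with
  | nil => simp [PySem.Str.join, PySem.Chars.join_singleton, PySem.Chars.join_nil]
  | cons y t =>
    apply String.toList_injective
    simp [PySem.Str.toList_join, PySem.Chars.join_cons_cons]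

-- A's behaviour on a maximal non-delimiter run, as one step
lemma pvARec_run : ∀ (tl : List String) (s x : String), pvIsDelim x = false →
    pvARec (x :: tl) s =
      (let j := s ++ x ++ PySem.Str.join "" (tl.take (pvRunLen tl));
       let tail := tl.drop (pvRunLen tl);
       (if tail.isEmpty || j ≠ "" then [j] else []) ++ pvARec tail "") := by
  intro tl
  induction tl with
  | nil =>
    intro s x hx
    simp [pvARec, hx, pvRunLen, pvJoin_nil]
  | cons y t ih =>
    intro s x hx
    have step : pvARec (x :: y :: t) s = pvARec (y :: t) (s ++ x) := by
      simp [pvARec, hx]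
    by_cases hy : pvIsDelim y
    · -- run stops at y: A flushes s ++ x before the delimiter
      rw [step]
      have hr0 : pvRunLen (y :: t) = 0 := by simp [pvRunLen, hy]
      rw [hr0]
      simp only [List.take_zero, List.drop_zero, pvJoin_nil, String.append_empty]
      rw [pvARec, if_neg (by simp [hy])]
      simp [pvARec, hy]
      split_ifs <;> simp_all
    · -- run continues through y
      rw [step, ih (s ++ x) y (by simpa using hy)]
      have hr : pvRunLen (y :: t) = pvRunLen t + 1 := by simp [pvRunLen, hy]
      rw [hr]
      simp only [List.take_succ_cons, List.drop_succ_cons, pvJoin_cons]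
      simp [String.append_assoc]

lemma pvBGo_eq_pvARec : ∀ (n : Nat) (l : List String), l.length ≤ n → pvBGo l = pvARec l "" := by
  intro n
  induction n with
  | zero =>
    intro l h
    have : l = [] := by simpa using List.length_eq_zero_iff.mp (by omega)
    subst this; simp [pvBGo, pvARec]
  | succ n ih =>
    intro l h
    match l with
    | [] => simp [pvBGo, pvARec]
    | x :: tl =>
      simp only [List.length_cons] at h
      by_cases hx : pvIsDelim x
      · rw [pvBGo, if_pos hx, ih tl (by omega)]
        rw [pvARec, if_neg (by simp [hx])]
        simp
      · rw [pvBGo, if_neg hx, pvARec_run tl "" x (by simpa using hx)]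
        simp only [List.take_succ_cons, List.drop_succ_cons, pvJoin_cons]
        rw [ih (tl.drop (pvRunLen tl)) (by simp [List.length_drop]; omega)]
        simp [String.empty_append]

-- ===== VERDICT (by name: the statement is the Claim_ definition above) =====
theorem update_lines_spec : Claim_equal_update_lines := by
  intro line _
  unfold Spec_update_lines update_lines update_lines_alt
  rw [pvALoop_eq line line 0 [] "" (by simp), pvBGo_eq_pvARec line.length line (le_refl _)]
  simp
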